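-- pv_equiv track=rewrite | github.com/rajendrapandey95/LeetCode | 2025/March 2025/3356. Zero Array Transformation II.py | _can_form_zero_array
-- ===== SOURCE A (Python) =====
-- from typing import List
--
-- def _can_form_zero_array(nums: List[int], queries: List[List[int]], k: int) -> bool:
--     n = len(nums)
--     diff = [0] * (n + 1)
--     total = 0
--
--     for i in range(k):
--         start, end, val = queries[i]
--         diff[start] += val
--         diff[end + 1] -= val
--
--     for i in range(n):
--         total += diff[i]
--         if total < nums[i]:
--             return False
--
--     return True
-- ===== SOURCE B (Python) =====
-- from typing import List
--
-- def _can_form_zero_array(nums: List[int], queries: List[List[int]], k: int) -> bool: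
--     used = [q for j, q in enumerate(queries) if j < k]
--     for i, need in enumerate(nums):
--         started = sum(val for start, end, val in used if start <= i)
--         ended = sum(val for start, end, val in used if end < i)
--         if started - ended < need:
--             return False
--     return True
-- ===== Notes on version B (the rewrite author's own statement) =====
-- stated objective: simpler
-- what changed: Replaces the difference array and running prefix sum with a direct per-index scan: for each index i it sums the first-k query values whose range has started (start <= i) minus those that have ended (end < i), and compares with nums[i]; the first k queries are selected by enumeration instead of indexed access.
-- outside the precondition, e.g. on _can_form_zero_array([1], [[-1, 0, 1]], 1): A returns False, B returns True; on _can_form_zero_array([1, 1], [[0, -2, 3]], 1): A returns True, B returns False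
import Mathlib
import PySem

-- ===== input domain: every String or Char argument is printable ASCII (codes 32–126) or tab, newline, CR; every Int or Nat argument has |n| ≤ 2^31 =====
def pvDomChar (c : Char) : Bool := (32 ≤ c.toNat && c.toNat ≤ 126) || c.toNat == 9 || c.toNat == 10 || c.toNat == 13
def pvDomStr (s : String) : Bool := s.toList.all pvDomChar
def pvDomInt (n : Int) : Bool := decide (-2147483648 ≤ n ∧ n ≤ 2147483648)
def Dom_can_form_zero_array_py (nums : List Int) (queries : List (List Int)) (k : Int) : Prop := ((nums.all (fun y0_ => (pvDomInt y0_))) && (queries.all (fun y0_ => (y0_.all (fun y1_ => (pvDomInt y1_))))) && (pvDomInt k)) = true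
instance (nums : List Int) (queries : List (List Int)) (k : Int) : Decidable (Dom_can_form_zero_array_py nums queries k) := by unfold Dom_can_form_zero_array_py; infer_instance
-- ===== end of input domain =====

-- B drops A's difference array: per index it sums started-query values minus ended-query values directly (simpler structure, not faster).

-- ===== PORT A =====
-- second loop of A: running prefix total with early return False
def pvLoopA (diff : List Int) : Nat → Int → List Int → Bool
  | _, _, [] => true
  | i, total, x :: rest =>
    let t := total + PySem.List.pyGetD diff (i : Int) 0
    if t < x then false else pvLoopA diff (i + 1) t rest

def can_form_zero_array_py (nums : List Int) (queries : List (List Int)) (k : Int) : Bool :=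
  let n := nums.length
  let diff0 : List Int := List.replicate (n + 1) 0
  let diff := (PySem.List.pyRange 0 k 1).foldl (fun d i =>
      let q := PySem.List.pyGetD queries i []
      let s := PySem.List.pyGetD q 0 0
      let e := PySem.List.pyGetD q 1 0
      let v := PySem.List.pyGetD q 2 0
      let d1 := PySem.List.pySetD d s (PySem.List.pyGetD d s 0 + v)
      PySem.List.pySetD d1 (e + 1) (PySem.List.pyGetD d1 (e + 1) 0 - v)) diff0
  pvLoopA diff 0 0 nums

-- ===== PORT B =====
-- sum(val for start, end, val in used if start <= i)
def pvStarted (i : Int) (used : List (List Int)) : Int :=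
  ((used.filter (fun q => decide (PySem.List.pyGetD q 0 0 ≤ i))).map
    (fun q => PySem.List.pyGetD q 2 0)).sum

-- sum(val for start, end, val in used if end < i)
def pvEnded (i : Int) (used : List (List Int)) : Int :=
  ((used.filter (fun q => decide (PySem.List.pyGetD q 1 0 < i))).map
    (fun q => PySem.List.pyGetD q 2 0)).sum

def can_form_zero_array_py_alt (nums : List Int) (queries : List (List Int)) (k : Int) : Bool :=
  let used := ((PySem.List.enumerate queries 0).filter (fun p => decide (p.1 < k))).map (fun p => p.2)
  (PySem.List.enumerate nums 0).all (fun p =>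
    !decide (pvStarted p.1 used - pvEnded p.1 used < p.2))

-- ===== PRECONDITION & SPEC =====
-- Pre_ excludes the inputs where A raises (k > len(queries): IndexError; a used query that is not a triple:
-- ValueError; a used index outside the diff buffer: IndexError) and, among inputs where A returns, those whose
-- used queries have a negative start (or end < -1): there A's diff writes land via Python's negative-index
-- wraparound, an artefact of the buffer, while B reads them as plain interval bounds.
def Pre_can_form_zero_array_py (nums : List Int) (queries : List (List Int)) (k : Int) : Prop :=
  k ≤ (queries.length : Int) ∧
  ∀ q ∈ queries.take k.toNat, q.length = 3 ∧ 0 ≤ q.getD 0 0 ∧ q.getD 0 0 ≤ (nums.length : Int) ∧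
    -1 ≤ q.getD 1 0 ∧ q.getD 1 0 < (nums.length : Int)
instance (nums : List Int) (queries : List (List Int)) (k : Int) : Decidable (Pre_can_form_zero_array_py nums queries k) := by unfold Pre_can_form_zero_array_py; infer_instance

def pvWitness_can_form_zero_array_py : List Int × List (List Int) × Int := ([1, 2], [[0, 1, 1], [1, 1, 1]], 2)

def Spec_can_form_zero_array_py (nums : List Int) (queries : List (List Int)) (k : Int) (out : Bool) : Prop := out = can_form_zero_array_py_alt nums queries k
instance (nums : List Int) (queries : List (List Int)) (k : Int) (out : Bool) : Decidable (Spec_can_form_zero_array_py nums queries k out) := by unfold Spec_can_form_zero_array_py; infer_instance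

-- ===== CLAIM (what is proved, stated in full; the proofs are below) =====
def Claim_equal_can_form_zero_array_py : Prop := ∀ (nums : List Int) (queries : List (List Int)) (k : Int), Dom_can_form_zero_array_py nums queries k → Pre_can_form_zero_array_py nums queries k → Spec_can_form_zero_array_py nums queries k (can_form_zero_array_py nums queries k)

-- ===== LEMMAS AND PROOFS =====

theorem pv_pyGetD0 (q : List Int) : PySem.List.pyGetD q 0 0 = q.getD 0 0 := PySem.List.pyGetD_zero q (0 : Int)
theorem pv_pyGetD1 (q : List Int) : PySem.List.pyGetD q 1 0 = q.getD 1 0 := by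
  rw [show (1 : Int) = ((1 : Nat) : Int) by norm_num, PySem.List.pyGetD_natCast]
theorem pv_pyGetD2 (q : List Int) : PySem.List.pyGetD q 2 0 = q.getD 2 0 := by
  rw [show (2 : Int) = ((2 : Nat) : Int) by norm_num, PySem.List.pyGetD_natCast]

-- per-index contribution of one query ("started" minus "ended"), and its sum over a query list
def pvInd (j : Nat) (q : List Int) : Int :=
  (if q.getD 0 0 ≤ (j : Int) then q.getD 2 0 else 0) - (if q.getD 1 0 < (j : Int) then q.getD 2 0 else 0)

def pvG (Q : List (List Int)) (j : Nat) : Int := (Q.map (pvInd j)).sum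

-- the per-query difference-array update of A's first loop
def pvStep (d : List Int) (q : List Int) : List Int :=
  let s := PySem.List.pyGetD q 0 0
  let e := PySem.List.pyGetD q 1 0
  let v := PySem.List.pyGetD q 2 0
  let d1 := PySem.List.pySetD d s (PySem.List.pyGetD d s 0 + v)
  PySem.List.pySetD d1 (e + 1) (PySem.List.pyGetD d1 (e + 1) 0 - v)

theorem pv_foldl_range_getD {α β : Type} (xs : List α) (dflt : α) (f : β → α → β) :
    ∀ (m : Nat), m ≤ xs.length → ∀ d0 : β,
      (List.range m).foldl (fun d j => f d (xs.getD j dflt)) d0 = (xs.take m).foldl f d0 := by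
  intro m
  induction m with
  | zero => intro _ d0; simp
  | succ m ih =>
    intro hm d0
    rw [List.range_succ, List.foldl_append, ih (by omega), List.take_add_one, List.foldl_append]
    simp [List.getD, List.getElem?_eq_getElem (show m < xs.length by omega)]

theorem pv_fold_range_eq_take (queries : List (List Int)) (k : Int)
    (hk : k ≤ (queries.length : Int)) (f : List Int → List Int → List Int) (d0 : List Int) :
    (PySem.List.pyRange 0 k 1).foldl (fun d i => f d (PySem.List.pyGetD queries i [])) d0
      = (queries.take k.toNat).foldl f d0 := by
  rw [PySem.List.pyRange_one, List.foldl_map]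
  have h : ∀ (j : Nat), PySem.List.pyGetD queries (0 + (j : Int)) [] = queries.getD j [] := by
    intro j; rw [zero_add, PySem.List.pyGetD_natCast]
  simp only [h]
  rw [show (k - 0).toNat = k.toNat by omega]
  exact pv_foldl_range_getD queries [] f k.toNat (by omega) d0

theorem pv_sum_take_set (d : List Int) (j m : Nat) (x : Int) (hj : j < d.length) :
    ((d.set j x).take m).sum = (d.take m).sum + (if j < m then x - d.getD j 0 else 0) := by
  induction d generalizing j m with
  | nil => simp at hj
  | cons a d ih =>
    cases j with
    | zero =>
      cases m with
      | zero => simp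
      | succ m => simp [List.set_cons_zero]; ring
    | succ j =>
      cases m with
      | zero => simp
      | succ m =>
        simp only [List.set_cons_succ, List.take_succ_cons, List.sum_cons, List.getD_cons_succ]
        rw [ih j m (by simpa using hj)]
        simp only [Nat.succ_lt_succ_iff]
        ring

theorem pv_sum_take_succ (l : List Int) (i : Nat) (hi : i < l.length) :
    (l.take (i + 1)).sum = (l.take i).sum + l.getD i 0 := by
  rw [List.take_add_one]
  simp only [List.getElem?_eq_getElem hi, Option.toList_some, List.sum_append, List.sum_cons,
    List.sum_nil, List.getD, Option.getD_some, add_zero]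

theorem pv_step_length (d q : List Int) : (pvStep d q).length = d.length := by
  simp [pvStep, PySem.List.length_pySetD]

theorem pv_step_prefix (n : Nat) (d q : List Int) (hd : d.length = n + 1)
    (h0 : 0 ≤ q.getD 0 0) (hsn : q.getD 0 0 ≤ (n : Int))
    (he : -1 ≤ q.getD 1 0) (hen : q.getD 1 0 < (n : Int))
    (i : Nat) (_hi : i < n) :
    ((pvStep d q).take (i + 1)).sum = (d.take (i + 1)).sum + pvInd i q := by
  have hq0 := pv_pyGetD0 q
  have hq1 := pv_pyGetD1 q
  have hq2 := pv_pyGetD2 q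
  set s := q.getD 0 0 with hs
  set e := q.getD 1 0 with he'
  set v := q.getD 2 0 with hv
  clear_value s e v
  have hsN : s.toNat < d.length := by omega
  have heN : (e + 1).toNat < d.length := by omega
  unfold pvStep
  dsimp only
  rw [hq0, hq1, hq2]
  rw [PySem.List.pySetD_of_nonneg d _ (show (0:Int) ≤ s by omega)]
  rw [PySem.List.pySetD_of_nonneg _ _ (show (0:Int) ≤ e + 1 by omega)]
  rw [show PySem.List.pyGetD d s 0 = d.getD s.toNat 0 by
        rw [PySem.List.pyGetD_eq_getElem d 0 (by omega) (by omega)]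
        exact (List.getD_eq_getElem d 0 hsN).symm]
  rw [show ∀ x : Int, PySem.List.pyGetD (d.set s.toNat x) (e + 1) 0
        = (d.set s.toNat x).getD (e + 1).toNat 0 from fun x => by
        rw [PySem.List.pyGetD_eq_getElem _ 0 (by omega) (by simp [List.length_set]; omega)]
        exact (List.getD_eq_getElem _ 0 (by simp [List.length_set]; omega)).symm]
  rw [pv_sum_take_set _ _ _ _ (by simpa [List.length_set] using heN)]
  rw [pv_sum_take_set _ _ _ _ hsN]
  have hc1 : s.toNat < i + 1 ↔ s ≤ (i : Int) := by omega
  have hc2 : (e + 1).toNat < i + 1 ↔ e < (i : Int) := by omega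
  unfold pvInd
  rw [← hs, ← he', ← hv]
  simp only [hc1, hc2]
  split_ifs <;> ring

theorem pv_fold_length (Q : List (List Int)) (d : List Int) :
    (Q.foldl pvStep d).length = d.length := by
  induction Q generalizing d with
  | nil => rfl
  | cons q Q ih => rw [List.foldl_cons, ih, pv_step_length]

theorem pv_fold_prefix (n : Nat) (Q : List (List Int)) (d : List Int) (hd : d.length = n + 1)
    (hQ : ∀ q ∈ Q, 0 ≤ q.getD 0 0 ∧ q.getD 0 0 ≤ (n : Int) ∧ -1 ≤ q.getD 1 0 ∧ q.getD 1 0 < (n : Int))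
    (i : Nat) (hi : i < n) :
    ((Q.foldl pvStep d).take (i + 1)).sum = (d.take (i + 1)).sum + pvG Q i := by
  induction Q generalizing d with
  | nil => simp [pvG]
  | cons q Q ih =>
    obtain ⟨h0, hsn, he, hen⟩ := hQ q (by simp)
    rw [List.foldl_cons, ih (pvStep d q) (by rw [pv_step_length]; exact hd)
      (fun q' hq' => hQ q' (by simp [hq'])),
      pv_step_prefix n d q hd h0 hsn he hen i hi]
    simp [pvG]
    ring

theorem pv_loopA_spec (nums diff : List Int) (hlen : nums.length < diff.length) :
    ∀ (rest : List Int) (i : Nat) (total : Int), rest = nums.drop i →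
      total = (diff.take i).sum →
      pvLoopA diff i total rest
        = decide (∀ j : Nat, j < nums.length → i ≤ j → nums.getD j 0 ≤ (diff.take (j + 1)).sum) := by
  intro rest
  induction rest with
  | nil =>
    intro i total hrest _
    have hni : nums.length ≤ i := by
      by_contra h
      have := congrArg List.length hrest
      simp [List.length_drop] at this
      omega
    simp only [pvLoopA]
    symm
    simp only [decide_eq_true_iff]
    intro j hj hij; omega
  | cons x rest ih =>
    intro i total hrest htotal
    have hlenr : rest.length + 1 = nums.length - i := by
      have := congrArg List.length hrest
      simpa using this
    have hi : i < nums.length := by omega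
    have hx : nums.getD i 0 = x := by
      have : nums[i]? = some x := by
        have h0 : (nums.drop i)[0]? = some x := by rw [← hrest]; rfl
        simpa using h0
      simp [List.getD, this]
    have ht : total + PySem.List.pyGetD diff (i : Int) 0 = (diff.take (i + 1)).sum := by
      rw [PySem.List.pyGetD_natCast, htotal, pv_sum_take_succ diff i (by omega)]
    simp only [pvLoopA, ht]
    by_cases hcmp : (diff.take (i + 1)).sum < x
    · rw [if_pos hcmp]
      symm
      simp only [decide_eq_false_iff_not]
      intro h
      have := h i hi (le_refl i)
      rw [hx] at this
      omega
    · rw [if_neg hcmp]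
      rw [ih (i + 1) ((diff.take (i + 1)).sum) (by
        have h1 := congrArg (List.drop 1) hrest
        simpa [List.drop_drop, Nat.add_comm] using h1) rfl]
      rw [decide_eq_decide]
      constructor
      · intro h j hj hij
        rcases Nat.eq_or_lt_of_le hij with h' | h'
        · subst h'; rw [hx]; omega
        · exact h j hj h'
      · intro h j hj hij
        exact h j hj (by omega)

theorem pv_enum_filter_take (k : Int) (xs : List (List Int)) :
    ∀ (s : Int), (((PySem.List.enumerate xs s).filter (fun p => decide (p.1 < k))).map
        (fun p => p.2)) = xs.take (k - s).toNat := by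
  induction xs with
  | nil => intro s; simp [PySem.List.enumerate_nil]
  | cons x xs ih =>
    intro s
    rw [PySem.List.enumerate_cons, List.filter_cons]
    by_cases h : s < k
    · rw [if_pos (by simpa using h), List.map_cons, ih (s + 1),
        show (k - s).toNat = (k - (s + 1)).toNat + 1 by omega, List.take_succ_cons]
    · rw [if_neg (by simpa using h), ih (s + 1),
        show (k - s).toNat = 0 by omega, show (k - (s + 1)).toNat = 0 by omega]
      simp

theorem pv_started_ended (Q : List (List Int)) (j : Nat) :
    pvStarted (j : Int) Q - pvEnded (j : Int) Q = pvG Q j := by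
  induction Q with
  | nil => rfl
  | cons q Q ih =>
    have hq0 := pv_pyGetD0 q
    have hq1 := pv_pyGetD1 q
    have hq2 := pv_pyGetD2 q
    simp only [pvStarted, pvEnded, pvG, List.filter_cons, List.map_cons, List.sum_cons,
      hq0, hq1] at ih ⊢
    rw [show pvInd j q = (if q.getD 0 0 ≤ (j : Int) then q.getD 2 0 else 0)
          - (if q.getD 1 0 < (j : Int) then q.getD 2 0 else 0) from rfl]
    by_cases h1 : q.getD 0 0 ≤ (j : Int) <;> by_cases h2 : q.getD 1 0 < (j : Int)
    · rw [if_pos (by simpa using h1), if_pos (by simpa using h2), if_pos h1, if_pos h2]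
      simp only [List.map_cons, List.sum_cons, hq2]
      linarith [ih]
    · rw [if_pos (by simpa using h1), if_neg (by simpa using h2), if_pos h1, if_neg h2]
      simp only [List.map_cons, List.sum_cons, hq2]
      linarith [ih]
    · rw [if_neg (by simpa using h1), if_pos (by simpa using h2), if_neg h1, if_pos h2]
      simp only [List.map_cons, List.sum_cons, hq2]
      linarith [ih]
    · rw [if_neg (by simpa using h1), if_neg (by simpa using h2), if_neg h1, if_neg h2]
      linarith [ih]

-- ===== VERDICT (by name: the statement is the Claim_ definition above) =====
theorem can_form_zero_array_py_spec : Claim_equal_can_form_zero_array_py := by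
  intro nums queries k _ hpre
  obtain ⟨hk, hq⟩ := hpre
  unfold Spec_can_form_zero_array_py can_form_zero_array_py can_form_zero_array_py_alt
  dsimp only
  set n := nums.length with hn
  set Q := queries.take k.toNat with hQdef
  rw [show (fun (d : List Int) (i : Int) =>
      let q := PySem.List.pyGetD queries i []
      let s := PySem.List.pyGetD q 0 0
      let e := PySem.List.pyGetD q 1 0
      let v := PySem.List.pyGetD q 2 0
      let d1 := PySem.List.pySetD d s (PySem.List.pyGetD d s 0 + v)
      PySem.List.pySetD d1 (e + 1) (PySem.List.pyGetD d1 (e + 1) 0 - v))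
    = (fun d i => pvStep d (PySem.List.pyGetD queries i [])) from rfl]
  rw [pv_fold_range_eq_take queries k hk pvStep (List.replicate (n + 1) 0)]
  set diff := Q.foldl pvStep (List.replicate (n + 1) 0) with hdiff
  have hdlen : diff.length = n + 1 := by
    rw [hdiff, pv_fold_length]; simp
  have hQv : ∀ q ∈ Q, 0 ≤ q.getD 0 0 ∧ q.getD 0 0 ≤ (n : Int) ∧ -1 ≤ q.getD 1 0 ∧
      q.getD 1 0 < (n : Int) := by
    intro q hqm
    obtain ⟨_, a, b, c, d⟩ := hq q hqm
    exact ⟨a, b, c, d⟩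
  have hpref : ∀ i : Nat, i < n → (diff.take (i + 1)).sum = pvG Q i := by
    intro i hi
    rw [hdiff, pv_fold_prefix n Q _ (by simp) hQv i hi]
    have : (List.take (i + 1) (List.replicate (n + 1) (0 : Int))).sum = 0 := by
      simp [List.take_replicate]
    rw [this, zero_add]
  rw [pv_loopA_spec nums diff (by omega) nums 0 0 (by simp) (by simp)]
  have hused : (((PySem.List.enumerate queries 0).filter (fun p => decide (p.1 < k))).map
      (fun p => p.2)) = Q := by
    rw [pv_enum_filter_take k queries 0, hQdef]
    norm_num
  rw [hused]
  rw [Bool.eq_iff_iff]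
  simp only [decide_eq_true_iff, List.all_eq_true]
  constructor
  · intro h p hp
    rw [PySem.List.mem_enumerate_iff] at hp
    obtain ⟨j, hj, hpj⟩ := hp
    subst hpj
    simp only [zero_add, Bool.not_eq_eq_eq_not, Bool.not_true, decide_eq_false_iff_not, not_lt]
    rw [pv_started_ended Q j]
    have := h j hj (by omega)
    rw [hpref j hj] at this
    simpa [List.getD, List.getElem?_eq_getElem hj] using this
  · intro h j hj _
    have := h ((j : Int), nums[j]) (by
      rw [PySem.List.mem_enumerate_iff]
      exact ⟨j, hj, by simp⟩)
    simp only [Bool.not_eq_eq_eq_not, Bool.not_true, decide_eq_false_iff_not, not_lt] at this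
    rw [pv_started_ended Q j] at this
    rw [hpref j hj]
    simpa [List.getD, List.getElem?_eq_getElem hj] using this
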